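-- pv_equiv track=rewrite | github.com/Mihail-Bay/Algoritthms-and-data-strucure- | Lab6/task7/src/Count_beautiful_pairs.py | count_beautiful_pairs
-- ===== SOURCE A (Python) =====
-- from collections import defaultdict
--
-- def count_beautiful_pairs(n, k, S, beautiful_pairs):
--     pair_map = defaultdict(list)
--
--     # Создание отображения для красивых пар
--     for a, b in beautiful_pairs:
--         pair_map[a].append(b)
--
--     # Словарь для подсчета встречаемости камней
--     count = defaultdict(int)
--     beautiful_pair_count = 0
--
--     # Проход по каждому камню в строке S
--     for stone in S:
--         if stone in pair_map:  # Если это 'a' из пары (a, b)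
--             for b in pair_map[stone]:  # Получаем 'b' для текущего 'a'
--                 # Увеличиваем количество красивых пар на количество уже встреченных 'b'
--                 beautiful_pair_count += count[b]
--
--                 # Увеличиваем счетчик текущего камня
--         count[stone] += 1
--
--     return beautiful_pair_count
-- ===== SOURCE B (Python) =====
-- from bisect import bisect_left
-- from collections import defaultdict
--
-- def count_beautiful_pairs(n, k, S, beautiful_pairs):
--     # Index: each character of S -> ascending list of its positions.
--     positions = defaultdict(list)
--     for i, ch in enumerate(S):
--         positions[ch].append(i)
--     total = 0
--     for a, b in beautiful_pairs:
--         pos_b = positions.get(b, [])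
--         for pa in positions.get(a, []):
--             # number of b-positions strictly before pa
--             total += bisect_left(pos_b, pa)
--     return total
-- ===== Notes on version B (the rewrite author's own statement) =====
-- stated objective: alternative
-- what changed: Replaced the single streaming pass with interleaved counter/pair dicts by an index-then-count scheme: build a char->sorted-positions index once, then for each beautiful pair count earlier b-positions per a-position with bisect_left.
import Mathlib
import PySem

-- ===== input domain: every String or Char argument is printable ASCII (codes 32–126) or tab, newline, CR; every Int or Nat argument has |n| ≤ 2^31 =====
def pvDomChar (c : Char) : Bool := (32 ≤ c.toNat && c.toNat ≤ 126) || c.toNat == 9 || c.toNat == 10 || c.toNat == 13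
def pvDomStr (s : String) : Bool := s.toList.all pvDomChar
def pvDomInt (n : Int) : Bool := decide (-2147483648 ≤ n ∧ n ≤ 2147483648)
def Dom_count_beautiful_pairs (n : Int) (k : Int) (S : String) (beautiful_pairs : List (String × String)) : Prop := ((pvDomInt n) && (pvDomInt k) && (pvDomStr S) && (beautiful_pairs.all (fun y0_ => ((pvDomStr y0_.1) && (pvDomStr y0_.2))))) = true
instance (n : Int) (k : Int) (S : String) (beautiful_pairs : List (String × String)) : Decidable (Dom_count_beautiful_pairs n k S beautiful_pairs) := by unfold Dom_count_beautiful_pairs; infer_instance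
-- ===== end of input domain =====

-- B replaces A's single streaming pass (counter dict updated per stone) by an index-then-count
-- scheme: build a char -> ascending positions index once, then count per beautiful pair
-- (objective: alternative decomposition, same exact result).

-- ===== PORT A =====
-- A: one pass over S; pair_map groups the b's by a; count is the counter of stones seen so far.
def count_beautiful_pairs (n : Int) (k : Int) (S : String) (beautiful_pairs : List (String × String)) : Int :=
  let pair_map : PySem.Dict String (List String) :=
    beautiful_pairs.foldl (fun d p => d.modify p.1 [] (fun l => l ++ [p.2])) PySem.Dict.empty
  (S.toList.foldl
    (fun (st : PySem.Dict String Int × Int) stone =>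
      if pair_map.contains (String.mk [stone]) then
        (st.1.modify (String.mk [stone]) 0 (fun v => v + 1),
         (pair_map.getD (String.mk [stone]) []).foldl (fun acc b => acc + st.1.getD b 0) st.2)
      else
        (st.1.modify (String.mk [stone]) 0 (fun v => v + 1), st.2))
    (PySem.Dict.empty, 0)).2

-- ===== PORT B =====
-- B: positions[ch] = ascending list of indices of ch in S; per pair (a,b), for each a-position
-- add the number of b-positions strictly before it (bisect_left on the sorted b-positions,
-- ported exactly as counting the smaller elements of that ascending list).
def count_beautiful_pairs_alt (n : Int) (k : Int) (S : String) (beautiful_pairs : List (String × String)) : Int :=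
  let positions : PySem.Dict String (List Int) :=
    (PySem.List.enumerate S.toList 0).foldl
      (fun d p => d.modify (String.mk [p.2]) [] (fun l => l ++ [p.1])) PySem.Dict.empty
  beautiful_pairs.foldl
    (fun total p =>
      (positions.getD p.1 []).foldl
        (fun t pa => t + (((positions.getD p.2 []).filter (fun x => decide (x < pa))).length : Int))
        total)
    0

-- ===== PRECONDITION & SPEC =====
def Spec_count_beautiful_pairs (n : Int) (k : Int) (S : String) (beautiful_pairs : List (String × String)) (out : Int) : Prop := out = count_beautiful_pairs_alt n k S beautiful_pairs
instance (n : Int) (k : Int) (S : String) (beautiful_pairs : List (String × String)) (out : Int) : Decidable (Spec_count_beautiful_pairs n k S beautiful_pairs out) := by unfold Spec_count_beautiful_pairs; infer_instance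

-- ===== CLAIM (what is proved, stated in full; the proofs are below) =====
def Claim_equal_count_beautiful_pairs : Prop := ∀ (n : Int) (k : Int) (S : String) (beautiful_pairs : List (String × String)), Dom_count_beautiful_pairs n k S beautiful_pairs → Spec_count_beautiful_pairs n k S beautiful_pairs (count_beautiful_pairs n k S beautiful_pairs)

-- ===== LEMMAS AND PROOFS =====

-- the stone c as the length-1 string Python compares dict keys against
abbrev pvKey (c : Char) : String := String.mk [c]

-- reference value of one pair (a,b) on suffix cs, when nb b's were already seen
def pvAux (a b : String) (nb : Int) : List Char → Int
  | [] => 0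
  | c :: cs => (if pvKey c = a then nb else 0) + pvAux a b (nb + if pvKey c = b then 1 else 0) cs

-- indices (from offset k) of the characters of cs whose key is a
def pvIdxs (a : String) (k : Int) : List Char → List Int
  | [] => []
  | c :: cs => (if pvKey c = a then [k] else []) ++ pvIdxs a (k + 1) cs

theorem pv_sum_map_add (l : List (String × String)) (f g : (String × String) → Int) :
    (l.map (fun p => f p + g p)).sum = (l.map f).sum + (l.map g).sum := by
  induction l with
  | nil => simp
  | cons p l ih => simp [ih]; ring

theorem pv_contains_fold (l : List (String × String)) (d : PySem.Dict String (List String)) (s : String) :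
    ((l.foldl (fun d p => d.modify p.1 [] (fun t => t ++ [p.2])) d).contains s = true)
      ↔ (d.contains s = true ∨ ∃ p ∈ l, p.1 = s) := by
  induction l generalizing d with
  | nil => simp
  | cons p l ih =>
    simp [List.foldl_cons, ih, PySem.Dict.contains_modify, beq_iff_eq]
    tauto

theorem pv_ite_sum (pairs : List (String × String)) (s : String) (g : String → Int) :
    (((pairs.filter (fun p => p.1 == s)).map (fun p => p.2)).map g).sum
      = (pairs.map (fun p => if s = p.1 then g p.2 else 0)).sum := by
  induction pairs with
  | nil => simp
  | cons p l ih =>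
    simp only [List.map_map] at ih ⊢
    by_cases h : p.1 = s
    · simp [h, ih]
    · simp [h, Ne.symm h, ih]

theorem pvA_loop (pairs : List (String × String)) (cs : List Char) :
    ∀ (cnt : PySem.Dict String Int) (acc : Int),
    (cs.foldl
      (fun (st : PySem.Dict String Int × Int) stone =>
        if (pairs.foldl (fun d p => d.modify p.1 [] (fun l => l ++ [p.2])) PySem.Dict.empty).contains (String.mk [stone]) then
          (st.1.modify (String.mk [stone]) 0 (fun v => v + 1),
           ((pairs.foldl (fun d p => d.modify p.1 [] (fun l => l ++ [p.2])) PySem.Dict.empty).getD (String.mk [stone]) []).foldl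
             (fun acc b => acc + st.1.getD b 0) st.2)
        else
          (st.1.modify (String.mk [stone]) 0 (fun v => v + 1), st.2))
      (cnt, acc)).2
    = acc + (pairs.map (fun p => pvAux p.1 p.2 (cnt.getD p.2 0) cs)).sum := by
  induction cs with
  | nil => simp [pvAux]
  | cons c cs ih =>
    intro cnt acc
    have hcnt : ∀ p : String × String,
        (cnt.modify (String.mk [c]) 0 (fun v => v + 1)).getD p.2 0
          = cnt.getD p.2 0 + (if pvKey c = p.2 then 1 else 0) := by
      intro p
      rw [PySem.Dict.getD_modify]
      by_cases h : p.2 = String.mk [c]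
      · have h' : pvKey c = p.2 := h.symm
        rw [if_pos h, if_pos h', h]
      · have h' : ¬ (pvKey c = p.2) := fun e => h e.symm
        rw [if_neg h, if_neg h']
        simp
    have hmod : (pairs.map (fun p => pvAux p.1 p.2
          ((cnt.modify (String.mk [c]) 0 (fun v => v + 1)).getD p.2 0) cs)).sum
        = (pairs.map (fun p => pvAux p.1 p.2
          (cnt.getD p.2 0 + if pvKey c = p.2 then 1 else 0) cs)).sum := by
      congr 1
      exact List.map_congr_left (fun p _ => by rw [hcnt])
    have hsplit : (pairs.map (fun p => pvAux p.1 p.2 (cnt.getD p.2 0) (c :: cs))).sum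
        = (pairs.map (fun p => if pvKey c = p.1 then cnt.getD p.2 0 else 0)).sum
          + (pairs.map (fun p => pvAux p.1 p.2
              (cnt.getD p.2 0 + if pvKey c = p.2 then 1 else 0) cs)).sum := by
      rw [← pv_sum_map_add]
      simp only [pvAux]
    by_cases hc : (pairs.foldl (fun d p => d.modify p.1 [] (fun l => l ++ [p.2])) PySem.Dict.empty).contains (String.mk [c]) = true
    · simp only [List.foldl_cons, if_pos hc]
      rw [ih, hmod, hsplit]
      rw [PySem.List.foldl_add (g := fun b_ => cnt.getD b_ 0)]
      rw [PySem.Dict.getD_foldl_modify_append]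
      simp only [PySem.Dict.getD_empty, List.nil_append]
      rw [pv_ite_sum pairs (pvKey c) (fun b_ => cnt.getD b_ 0)]
      ring
    · simp only [List.foldl_cons, if_neg hc]
      rw [ih, hmod, hsplit]
      have h0 : ∀ p ∈ pairs, ¬ (pvKey c = p.1) := by
        intro p hp e
        exact hc ((pv_contains_fold pairs PySem.Dict.empty (String.mk [c])).mpr
          (Or.inr ⟨p, hp, e.symm⟩))
      have hz : (pairs.map (fun p => if pvKey c = p.1 then cnt.getD p.2 0 else 0)).sum = 0 := by
        rw [List.map_congr_left (g := fun _ => (0 : Int)) (fun p hp => by rw [if_neg (h0 p hp)])]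
        simp
      rw [hz]
      ring

theorem pvPos_eq (cs : List Char) :
    ∀ (k : Int) (d : PySem.Dict String (List Int)) (a : String),
    ((PySem.List.enumerate cs k).foldl
      (fun d p => d.modify (String.mk [p.2]) [] (fun l => l ++ [p.1])) d).getD a []
      = d.getD a [] ++ pvIdxs a k cs := by
  induction cs with
  | nil => simp [pvIdxs, PySem.List.enumerate_nil]
  | cons c cs ih =>
    intro k d a
    rw [PySem.List.enumerate_cons, List.foldl_cons, ih, pvIdxs]
    by_cases h : pvKey c = a
    · have : String.mk [c] = a := h
      simp [PySem.Dict.getD_modify, this, h]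
    · have : a ≠ String.mk [c] := fun e => h e.symm
      simp [PySem.Dict.getD_modify, this, h]

theorem pvIdxs_ge (a : String) (cs : List Char) :
    ∀ (k : Int) (x : Int), x ∈ pvIdxs a k cs → k ≤ x := by
  induction cs with
  | nil => simp [pvIdxs]
  | cons c cs ih =>
    intro k x hx
    rw [pvIdxs, List.mem_append] at hx
    rcases hx with h | h
    · by_cases hc : pvKey c = a
      · simp [hc] at h; omega
      · simp [hc] at h
    · have := ih (k + 1) x h; omega

theorem pvB2 (a b : String) (cs : List Char) :
    ∀ (k : Int) (lb : List Int), (∀ x ∈ lb, x < k) →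
    ((pvIdxs a k cs).map
      (fun pa => (((lb ++ pvIdxs b k cs).filter (fun x => decide (x < pa))).length : Int))).sum
      = pvAux a b (lb.length : Int) cs := by
  induction cs with
  | nil =>
    intro k lb hlb
    simp only [pvIdxs, pvAux, List.map_nil, List.sum_nil]
  | cons c cs ih =>
    intro k lb hlb
    have ha : pvIdxs a k (c :: cs) = (if pvKey c = a then [k] else []) ++ pvIdxs a (k + 1) cs := rfl
    have hbeq : pvIdxs b k (c :: cs) = (if pvKey c = b then [k] else []) ++ pvIdxs b (k + 1) cs := rfl
    have hlb' : ∀ x ∈ lb ++ (if pvKey c = b then [k] else []), x < k + 1 := by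
      intro x hx
      rcases List.mem_append.mp hx with h | h
      · have := hlb x h; omega
      · by_cases hc : pvKey c = b
        · simp [hc] at h; omega
        · simp [hc] at h
    have hrest : (lb ++ pvIdxs b k (c :: cs))
        = (lb ++ (if pvKey c = b then [k] else [])) ++ pvIdxs b (k + 1) cs := by
      rw [hbeq, List.append_assoc]
    have hIH := ih (k + 1) (lb ++ (if pvKey c = b then [k] else [])) hlb'
    -- the filter at pa = k picks exactly lb
    have hfk : ((lb ++ pvIdxs b k (c :: cs)).filter (fun x => decide (x < k))).length = lb.length := by
      rw [hrest, List.filter_append, List.filter_append]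
      have h1 : lb.filter (fun x => decide (x < k)) = lb :=
        List.filter_eq_self.mpr (fun x hx => by simpa using hlb x hx)
      have h2 : (if pvKey c = b then [k] else []).filter (fun x => decide (x < k)) = [] := by
        by_cases hc : pvKey c = b <;> simp [hc]
      have h3 : (pvIdxs b (k + 1) cs).filter (fun x => decide (x < k)) = [] := by
        apply List.filter_eq_nil_iff.mpr
        intro x hx
        have := pvIdxs_ge b cs (k + 1) x hx
        simp; omega
      rw [h1, h2, h3]; simp
    rw [ha, List.map_append, List.sum_append]
    conv_rhs => rw [pvAux]
    have hello : ((pvIdxs a (k + 1) cs).map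
        (fun pa => (((lb ++ pvIdxs b k (c :: cs)).filter (fun x => decide (x < pa))).length : Int))).sum
        = pvAux a b ((lb ++ (if pvKey c = b then [k] else [])).length : Int) cs := by
      rw [← hIH]
      simp only [hrest]
    rw [hello]
    have hlen : ((lb ++ (if pvKey c = b then [k] else [])).length : Int)
        = (lb.length : Int) + (if pvKey c = b then 1 else 0) := by
      by_cases hcb : pvKey c = b <;> simp [hcb]
    rw [hlen]
    by_cases hca : pvKey c = a
    · simp only [if_pos hca, List.map_cons, List.map_nil, List.sum_cons, List.sum_nil, add_zero]
      rw [hfk]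
    · simp [if_neg hca]

-- ===== VERDICT (by name: the statement is the Claim_ definition above) =====
theorem count_beautiful_pairs_spec : Claim_equal_count_beautiful_pairs := by
  intro n k S pairs _
  simp only [Spec_count_beautiful_pairs, count_beautiful_pairs, count_beautiful_pairs_alt]
  rw [pvA_loop pairs S.toList PySem.Dict.empty 0]
  have hgetD : ∀ s : String,
      ((PySem.List.enumerate S.toList 0).foldl
        (fun d p => d.modify (String.mk [p.2]) [] (fun l => l ++ [p.1])) PySem.Dict.empty).getD s []
      = pvIdxs s 0 S.toList := by
    intro s
    rw [pvPos_eq]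
    simp
  simp only [hgetD]
  have hstep : ∀ (total : Int) (p : String × String), p ∈ pairs →
      (pvIdxs p.1 0 S.toList).foldl
        (fun t pa => t + (((pvIdxs p.2 0 S.toList).filter (fun x => decide (x < pa))).length : Int)) total
      = total + ((pvIdxs p.1 0 S.toList).map
          (fun pa => (((pvIdxs p.2 0 S.toList).filter (fun x => decide (x < pa))).length : Int))).sum := by
    intro total p _
    rw [PySem.List.foldl_add]
  rw [PySem.List.foldl_congr_mem _ _ _ _ hstep]
  rw [PySem.List.foldl_add (g := fun p : String × String =>
      ((pvIdxs p.1 0 S.toList).map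
        (fun pa => (((pvIdxs p.2 0 S.toList).filter (fun x => decide (x < pa))).length : Int))).sum)]
  have hB : ∀ p ∈ pairs,
      ((pvIdxs p.1 0 S.toList).map
        (fun pa => (((pvIdxs p.2 0 S.toList).filter (fun x => decide (x < pa))).length : Int))).sum
      = pvAux p.1 p.2 0 S.toList := by
    intro p _
    have h := pvB2 p.1 p.2 S.toList 0 [] (by simp)
    simpa using h
  have hA : ∀ p ∈ pairs,
      pvAux p.1 p.2 ((PySem.Dict.empty : PySem.Dict String Int).getD p.2 0) S.toList
      = pvAux p.1 p.2 0 S.toList := by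
    intro p _
    rw [PySem.Dict.getD_empty]
  rw [List.map_congr_left (fun p hp => hA p hp), List.map_congr_left (fun p hp => hB p hp)]
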